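-- pv_equiv track=rewrite | github.com/gaboza12/we-are-algorithm | 724thomas/Week7 DynamicProgramming1/2302.py | solution
-- ===== SOURCE A (Python) =====
-- def solution(n, m, arr):
--     fixed = set(arr)
--     arrs = []
--     temp = []
--     for i in range(1,n+1):
--         if i not in fixed:
--             temp.append(i)
--         else:
--             if temp:
--                 arrs.append(temp[:])
--                 temp = []
--     if temp:
--         arrs.append(temp[:])
--     dp = [1,2,3,5,8]
--     for i in range(5, n):
--         dp.append(dp[i-1] + dp[i-2])
--     ans = 1
--     for arr in arrs:
--         ans *= dp[len(arr)-1]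
--     return ans
-- ===== SOURCE B (Python) =====
-- def solution(n, m, arr):
--     occ = set(arr)
--     ans = 1
--     run = 0
--     for i in range(1, n + 2):
--         if i <= n and i not in occ:
--             run += 1
--         else:
--             if run:
--                 a, b = 1, 2
--                 for _ in range(run - 1):
--                     a, b = b, a + b
--                 ans *= a
--                 run = 0
--     return ans
-- ===== Notes on version B (the rewrite author's own statement) =====
-- stated objective: simpler
-- what changed: A builds an explicit list of free segments, precomputes a dp table of max(5,n) big-integer Fibonacci values and multiplies table lookups; B is a single fused pass over 1..n with a sentinel, tracking only a run length and a running product and computing each segment's count with two rolling Fibonacci variables, so no segment list or dp table is built and Fibonacci numbers are only computed up to each run's length.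
import Mathlib
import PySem

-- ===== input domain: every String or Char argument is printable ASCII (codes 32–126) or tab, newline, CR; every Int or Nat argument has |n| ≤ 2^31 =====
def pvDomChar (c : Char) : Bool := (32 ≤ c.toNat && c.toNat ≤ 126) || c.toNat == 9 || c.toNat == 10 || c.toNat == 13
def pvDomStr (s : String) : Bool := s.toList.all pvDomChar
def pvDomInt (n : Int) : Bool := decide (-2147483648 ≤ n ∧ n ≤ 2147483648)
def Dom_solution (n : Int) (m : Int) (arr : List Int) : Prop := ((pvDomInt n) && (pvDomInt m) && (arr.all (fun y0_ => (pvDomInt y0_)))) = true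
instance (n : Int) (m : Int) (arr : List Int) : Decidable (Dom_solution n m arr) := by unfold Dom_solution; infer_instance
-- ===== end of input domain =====

-- B fuses A's three passes (segment-list construction, dp-table build, product) into one
-- scan with a rolling Fibonacci pair per free run; objective: simpler (no table, no segment list).

-- ===== PORT A =====
-- Literal port of A. The two dp reads dp[i-1], dp[i-2] and the final read dp[len(a)-1]
-- always hit in-range indices in Python (dp has max(5, n) entries, segments have length
-- ≥ 1 and ≤ n), so pyGetD with default 0 is exact here.
def solution (n : Int) (m : Int) (arr : List Int) : Int :=
  let fixed : PySem.Set Int := PySem.Set.ofList arr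
  let st := (PySem.List.pyRange 1 (n+1) 1).foldl
    (fun (st : List (List Int) × List Int) i =>
      if ¬ (PySem.Set.contains fixed i = true) then (st.1, st.2 ++ [i])
      else if st.2 ≠ [] then (st.1 ++ [st.2], ([] : List Int))
      else st) ([], [])
  let arrs := if st.2 ≠ [] then st.1 ++ [st.2] else st.1
  let dp := (PySem.List.pyRange 5 n 1).foldl
    (fun dp i => dp ++ [PySem.List.pyGetD dp (i-1) 0 + PySem.List.pyGetD dp (i-2) 0])
    [1, 2, 3, 5, 8]
  arrs.foldl (fun ans a => ans * PySem.List.pyGetD dp ((a.length : Int) - 1) 0) 1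

-- ===== PORT B =====
-- Literal port of Source B: one pass i = 1..n+1 with accumulators (ans, run); a run is
-- closed by an occupied cell or the sentinel i = n+1, its count computed by a rolling pair.
def solution_alt (n : Int) (m : Int) (arr : List Int) : Int :=
  let occ : PySem.Set Int := PySem.Set.ofList arr
  let st := (PySem.List.pyRange 1 (n+2) 1).foldl
    (fun (st : Int × Int) i =>
      if i ≤ n ∧ ¬ (PySem.Set.contains occ i = true) then (st.1, st.2 + 1)
      else if st.2 ≠ 0 then
        let p := (PySem.List.pyRange 0 (st.2 - 1) 1).foldl
          (fun (p : Int × Int) _ => (p.2, p.1 + p.2)) (1, 2)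
        (st.1 * p.1, 0)
      else st) (1, 0)
  st.1

-- ===== PRECONDITION & SPEC =====
def Spec_solution (n : Int) (m : Int) (arr : List Int) (out : Int) : Prop := out = solution_alt n m arr
instance (n : Int) (m : Int) (arr : List Int) (out : Int) : Decidable (Spec_solution n m arr out) := by unfold Spec_solution; infer_instance

-- ===== CLAIM (what is proved, stated in full; the proofs are below) =====
def Claim_equal_solution : Prop := ∀ (n : Int) (m : Int) (arr : List Int), Dom_solution n m arr → Spec_solution n m arr (solution n m arr)

-- ===== LEMMAS AND PROOFS =====

-- the sequence 1,2,3,5,8,… : F k = dp[k]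
def F : Nat → Int
  | 0 => 1
  | 1 => 2
  | (k+2) => F k + F (k+1)

-- A's scan step (q i = "i is occupied")
def stA (q : Int → Bool) (st : List (List Int) × List Int) (i : Int) :
    List (List Int) × List Int :=
  if ¬ (q i = true) then (st.1, st.2 ++ [i])
  else if st.2 ≠ [] then (st.1 ++ [st.2], ([] : List Int))
  else st

-- B's scan step
def stB (n : Int) (q : Int → Bool) (st : Int × Int) (i : Int) : Int × Int :=
  if i ≤ n ∧ ¬ (q i = true) then (st.1, st.2 + 1)
  else if st.2 ≠ 0 then
    let p := (PySem.List.pyRange 0 (st.2 - 1) 1).foldl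
      (fun (p : Int × Int) _ => (p.2, p.1 + p.2)) (1, 2)
    (st.1 * p.1, 0)
  else st

def prodF (xs : List (List Int)) : Int := xs.foldl (fun a s => a * F (s.length - 1)) 1

def segSum (xs : List (List Int)) : Nat := (xs.map List.length).sum

theorem fibroll (k : Nat) :
    (PySem.List.pyRange 0 (k : Int) 1).foldl
      (fun (p : Int × Int) _ => (p.2, p.1 + p.2)) (1, 2) = (F k, F (k+1)) := by
  induction k with
  | zero => simp [PySem.List.pyRange_one_eq_nil, F]
  | succ k ih =>
    have h : ((k : Int) + 1) = ((k+1 : Nat) : Int) := by push_cast; ring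
    rw [← h, PySem.List.pyRange_one_succ_right (by positivity), List.foldl_append, ih]
    simp [F]

theorem prodF_append_singleton (xs : List (List Int)) (s : List Int) :
    prodF (xs ++ [s]) = prodF xs * F (s.length - 1) := by
  simp [prodF, List.foldl_append]

theorem getD_mapF_nat {k M : Nat} (h : k < M) :
    ((List.range M).map F).getD k 0 = F k := by
  simp [List.getD_eq_getElem?_getD, h]

theorem getD_mapF {L M : Nat} (hL : 1 ≤ L) (hM : L ≤ M) :
    PySem.List.pyGetD ((List.range M).map F) ((L : Int) - 1) 0 = F (L - 1) := by
  have h : ((L : Int) - 1) = ((L - 1 : Nat) : Int) := by omega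
  rw [h, PySem.List.pyGetD_natCast]
  exact getD_mapF_nat (by omega)

theorem dpAux (d : Nat) :
    (PySem.List.pyRange 5 (5 + (d : Int)) 1).foldl
      (fun dp i => dp ++ [PySem.List.pyGetD dp (i-1) 0 + PySem.List.pyGetD dp (i-2) 0])
      [1, 2, 3, 5, 8]
    = (List.range (5 + d)).map F := by
  induction d with
  | zero => simp [PySem.List.pyRange_one_eq_nil]; decide
  | succ d ih =>
    have h : (5 + ((d + 1 : Nat) : Int)) = (5 + (d : Int)) + 1 := by push_cast; ring
    rw [h, PySem.List.pyRange_one_succ_right (by omega), List.foldl_append, ih]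
    simp only [List.foldl_cons, List.foldl_nil]
    have h1 : (5 + (d : Int)) - 1 = ((4 + d : Nat) : Int) := by push_cast; ring
    have h2 : (5 + (d : Int)) - 2 = ((3 + d : Nat) : Int) := by push_cast; ring
    rw [h1, h2, PySem.List.pyGetD_natCast, PySem.List.pyGetD_natCast,
      getD_mapF_nat (by omega), getD_mapF_nat (by omega)]
    have h3 : 5 + (d + 1) = (5 + d) + 1 := by omega
    have h4 : F (4 + d) + F (3 + d) = F (5 + d) := by
      have : F ((3 + d) + 2) = F (3 + d) + F ((3 + d) + 1) := rfl
      have e1 : (3 + d) + 2 = 5 + d := by omega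
      have e2 : (3 + d) + 1 = 4 + d := by omega
      rw [e1, e2] at this
      omega
    rw [h3, List.range_succ, List.map_append, h4]
    simp

theorem dp_eq (n : Int) :
    (PySem.List.pyRange 5 n 1).foldl
      (fun dp i => dp ++ [PySem.List.pyGetD dp (i-1) 0 + PySem.List.pyGetD dp (i-2) 0])
      [1, 2, 3, 5, 8]
    = (List.range (max 5 n.toNat)).map F := by
  by_cases h : n ≤ 5
  · rw [PySem.List.pyRange_one_eq_nil h]
    have hm : max 5 n.toNat = 5 := by omega
    rw [hm]; decide
  · obtain ⟨d, hd⟩ : ∃ d : Nat, n = 5 + (d : Int) := ⟨(n - 5).toNat, by omega⟩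
    subst hd
    have hm : max 5 (5 + (d : Int)).toNat = 5 + d := by omega
    rw [hm, dpAux]

-- main scan invariant: B's (ans, run) tracks (product over A's closed segments, A's temp length)
theorem scan (q : Int → Bool) (n : Int) (l : List Int) (hl : ∀ i ∈ l, i ≤ n)
    (arrs : List (List Int)) (temp : List Int)
    (hne : ∀ s ∈ arrs, s ≠ []) :
    (l.foldl (stB n q) (prodF arrs, (temp.length : Int)))
      = (prodF (l.foldl (stA q) (arrs, temp)).1,
         ((l.foldl (stA q) (arrs, temp)).2.length : Int))
    ∧ (∀ s ∈ (l.foldl (stA q) (arrs, temp)).1, s ≠ [])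
    ∧ segSum (l.foldl (stA q) (arrs, temp)).1 + (l.foldl (stA q) (arrs, temp)).2.length
        ≤ segSum arrs + temp.length + l.length := by
  induction l generalizing arrs temp with
  | nil => exact ⟨rfl, hne, by simp⟩
  | cons i l ih =>
    have hi : i ≤ n := hl i (by simp)
    have hl' : ∀ j ∈ l, j ≤ n := fun j hj => hl j (by simp [hj])
    by_cases hq : q i = true
    · by_cases ht : temp = []
      · subst ht
        have hA : stA q (arrs, ([] : List Int)) i = (arrs, []) := by simp [stA, hq]
        have hB : stB n q (prodF arrs, ((0 : Nat) : Int)) i = (prodF arrs, 0) := by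
          simp [stB, hq]
        rw [List.foldl_cons, List.foldl_cons, hA]
        simp only [List.length_nil] at hB ⊢
        rw [hB]
        obtain ⟨h1, h2, h3⟩ := ih hl' arrs [] hne
        exact ⟨h1, h2, by simp only [List.length_cons, List.length_nil] at h3 ⊢; omega⟩
      · have hlen : 1 ≤ temp.length := by
          cases temp with
          | nil => exact absurd rfl ht
          | cons a t => simp
        have hA : stA q (arrs, temp) i = (arrs ++ [temp], []) := by simp [stA, hq, ht]
        have hB : stB n q (prodF arrs, (temp.length : Int)) i
            = (prodF (arrs ++ [temp]), 0) := by
          have hc : ¬ (i ≤ n ∧ ¬ (q i = true)) := by simp [hq]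
          have hz : ((temp.length : Int)) ≠ 0 := by omega
          simp only [stB, if_neg hc]
          rw [if_pos hz]
          have hc1 : ((temp.length : Int) - 1) = ((temp.length - 1 : Nat) : Int) := by omega
          rw [hc1, fibroll, prodF_append_singleton]
        rw [List.foldl_cons, List.foldl_cons, hA, hB]
        have hne' : ∀ s ∈ arrs ++ [temp], s ≠ [] := by
          intro s hs
          rcases List.mem_append.1 hs with h | h
          · exact hne s h
          · simp at h; subst h; exact ht
        obtain ⟨h1, h2, h3⟩ := ih hl' (arrs ++ [temp]) [] hne'
        refine ⟨by simpa using h1, h2, ?_⟩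
        have hseg : segSum (arrs ++ [temp]) = segSum arrs + temp.length := by
          simp [segSum]
        simp only [List.length_nil] at h3
        rw [hseg] at h3
        simp only [List.length_cons] at h3 ⊢
        omega
    · have hA : stA q (arrs, temp) i = (arrs, temp ++ [i]) := by simp [stA, hq]
      have hB : stB n q (prodF arrs, (temp.length : Int)) i
          = (prodF arrs, ((temp ++ [i]).length : Int)) := by
        simp [stB, hq, hi]
      rw [List.foldl_cons, List.foldl_cons, hA, hB]
      obtain ⟨h1, h2, h3⟩ := ih hl' arrs (temp ++ [i]) hne
      refine ⟨h1, h2, ?_⟩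
      simp only [List.length_append, List.length_cons, List.length_nil] at h3 ⊢
      omega

theorem segment_le (xs : List (List Int)) (s : List Int) (hs : s ∈ xs) :
    s.length ≤ segSum xs := by
  have : s.length ∈ xs.map List.length := List.mem_map_of_mem hs
  exact List.le_sum_of_mem this

-- A's final product over dp equals prodF, once every segment length fits in dp
theorem prod_dp (M : Nat) (xs : List (List Int))
    (h : ∀ s ∈ xs, 1 ≤ s.length ∧ s.length ≤ M) :
    xs.foldl (fun ans a => ans * PySem.List.pyGetD ((List.range M).map F) ((a.length : Int) - 1) 0) 1
      = prodF xs := by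
  unfold prodF
  apply PySem.List.foldl_congr_mem
  intro acc s hs
  rw [getD_mapF (h s hs).1 (h s hs).2]

-- ===== VERDICT (by name: the statement is the Claim_ definition above) =====
theorem solution_spec : Claim_equal_solution := by
  intro n m arr _
  show solution n m arr = solution_alt n m arr
  simp only [solution, solution_alt]
  have hstA : (fun (st : List (List Int) × List Int) (i : Int) =>
      if ¬ (PySem.Set.contains (PySem.Set.ofList arr) i = true) then (st.1, st.2 ++ [i])
      else if st.2 ≠ [] then (st.1 ++ [st.2], ([] : List Int)) else st)
      = stA (fun i => PySem.Set.contains (PySem.Set.ofList arr) i) := rfl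
  have hstB : (fun (st : Int × Int) (i : Int) =>
      if i ≤ n ∧ ¬ (PySem.Set.contains (PySem.Set.ofList arr) i = true) then (st.1, st.2 + 1)
      else if st.2 ≠ 0 then
        let p := (PySem.List.pyRange 0 (st.2 - 1) 1).foldl
          (fun (p : Int × Int) _ => (p.2, p.1 + p.2)) (1, 2)
        (st.1 * p.1, 0)
      else st)
      = stB n (fun i => PySem.Set.contains (PySem.Set.ofList arr) i) := rfl
  rw [hstA, hstB, dp_eq]
  by_cases hn : 0 ≤ n
  case neg =>
    rw [PySem.List.pyRange_one_eq_nil (a := 1) (b := n+1) (by omega),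
        PySem.List.pyRange_one_eq_nil (a := 1) (b := n+2) (by omega)]
    simp
  case pos =>
  set q : Int → Bool := fun i => PySem.Set.contains (PySem.Set.ofList arr) i with hq
  set A := (PySem.List.pyRange 1 (n+1) 1).foldl (stA q) ([], []) with hAdef
  have hmem : ∀ i ∈ PySem.List.pyRange 1 (n+1) 1, i ≤ n := by
    intro i hi
    rw [PySem.List.mem_pyRange_one] at hi
    omega
  obtain ⟨h1, h2, h3⟩ := scan q n (PySem.List.pyRange 1 (n+1) 1) hmem [] [] (by simp)
  have hlen : (PySem.List.pyRange 1 (n+1) 1).length = n.toNat := by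
    rw [PySem.List.length_pyRange_one]
    omega
  simp only [List.length_nil, segSum, List.map_nil, List.sum_nil, Nat.zero_add, hlen] at h1 h3
  have hsplit : PySem.List.pyRange 1 (n+2) 1 = PySem.List.pyRange 1 (n+1) 1 ++ [n+1] := by
    have h := PySem.List.pyRange_one_succ_right (a := 1) (b := n+1) (by omega)
    rw [show n+1+1 = n+2 by ring] at h
    exact h
  rw [hsplit, List.foldl_append]
  have hinit : (prodF ([] : List (List Int)), ((0 : Nat) : Int)) = ((1 : Int), (0 : Int)) := by
    simp [prodF]
  rw [hinit] at h1
  rw [← hAdef] at h1 h2 h3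
  rw [h1]
  simp only [List.foldl_cons, List.foldl_nil]
  have hbound : ∀ s ∈ (if A.2 ≠ [] then A.1 ++ [A.2] else A.1),
      1 ≤ s.length ∧ s.length ≤ max 5 n.toNat := by
    intro s hs
    by_cases hA2 : A.2 = [] <;> simp only [hA2, ne_eq, not_true_eq_false, if_false,
        not_false_eq_true, if_true] at hs
    · refine ⟨?_, ?_⟩
      · have := h2 s hs
        cases s with
        | nil => exact absurd rfl this
        | cons a t => simp
      · have := segment_le A.1 s hs
        simp only [segSum] at this
        omega
    · rcases List.mem_append.1 hs with h | h
      · refine ⟨?_, ?_⟩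
        · have := h2 s h
          cases s with
          | nil => exact absurd rfl this
          | cons a t => simp
        · have := segment_le A.1 s h
          simp only [segSum] at this
          omega
      · simp only [List.mem_singleton] at h
        subst h
        refine ⟨?_, ?_⟩
        · cases hA : A.2 with
          | nil => exact absurd hA hA2
          | cons a t => simp
        · omega
  rw [prod_dp (max 5 n.toNat) _ hbound]
  have hcond : ¬ ((n + 1 ≤ n) ∧ ¬ (q (n+1) = true)) := by
    intro h
    omega
  by_cases hA2 : A.2 = []
  · rw [stB, if_neg hcond, if_neg (by simp [hA2])]
    simp [hA2]
  · have hl1 : 1 ≤ A.2.length := by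
      cases hA : A.2 with
      | nil => exact absurd hA hA2
      | cons a t => simp [hA]
    have hc1 : ((A.2.length : Int) - 1) = ((A.2.length - 1 : Nat) : Int) := by omega
    rw [stB, if_neg hcond, hc1, fibroll]
    simp only [ne_eq, hA2, not_false_eq_true, if_true]
    rw [prodF_append_singleton]
    show prodF A.1 * F (A.2.length - 1) =
      (if (A.2.length : Int) ≠ 0 then (prodF A.1 * F (A.2.length - 1), (0:Int))
       else (prodF A.1, (A.2.length : Int))).1
    rw [if_pos (show ((A.2.length : Int)) ≠ 0 by omega)]
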